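-- pv_equiv track=rewrite | github.com/f-sod/Monn | step7_final_interaction.py | seq_with_gap_to_idx
-- ===== SOURCE A (Python) =====
-- def seq_with_gap_to_idx(seq):
-- 	"""
-- 	Create a list of index for each sequences,
-- 	if a gap occurs with the seq, the value -1 is affected
-- 	else the index is affected
--
-- 	Return
-- 	------
-- 	list : idx_list
-- 	"""
-- 	idx_list = []
-- 	i = 0
-- 	for aa in seq:
-- 		if aa == '-':
-- 			idx_list.append(-1)
-- 		else:
-- 			idx_list.append(i)
-- 			i += 1
-- 	return idx_list
-- ===== SOURCE B (Python) =====
-- def seq_with_gap_to_idx(seq):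
-- 	"""
-- 	Two passes: first build a table of cumulative gap counts
-- 	(gaps[p] = number of '-' before position p), then map each
-- 	position to p - gaps[p], or -1 at a gap.
-- 	"""
-- 	gaps = [0]
-- 	for aa in seq:
-- 		gaps.append(gaps[-1] + (aa == '-'))
-- 	return [-1 if aa == '-' else p - gaps[p] for p, aa in enumerate(seq)]
-- ===== Notes on version B (the rewrite author's own statement) =====
-- stated objective: alternative
-- what changed: Replaces A's single loop threading a mutable next-index counter into conditional appends with two differently-shaped passes: first a cumulative gap-count table, then a mapping pass computing each index in closed form as position minus gaps before it.
import Mathlib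
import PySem

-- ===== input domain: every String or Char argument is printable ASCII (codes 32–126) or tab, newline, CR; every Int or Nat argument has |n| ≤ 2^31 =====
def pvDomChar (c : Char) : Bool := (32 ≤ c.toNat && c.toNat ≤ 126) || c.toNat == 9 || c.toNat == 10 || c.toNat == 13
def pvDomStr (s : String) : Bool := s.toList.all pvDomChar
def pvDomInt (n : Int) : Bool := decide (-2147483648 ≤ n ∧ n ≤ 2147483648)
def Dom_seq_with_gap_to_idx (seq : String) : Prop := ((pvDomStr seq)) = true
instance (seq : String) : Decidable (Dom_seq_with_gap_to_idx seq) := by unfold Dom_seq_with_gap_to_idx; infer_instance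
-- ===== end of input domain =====

-- B replaces A's threaded output-index counter with two passes: a cumulative gap-count table, then a mapping pass computing each index as position minus gaps before it.


-- ===== PORT A =====
-- for aa in seq: append -1 / append i and i += 1; state = (idx_list, i)
def seq_with_gap_to_idx (seq : String) : List Int :=
  (seq.toList.foldl
    (fun (st : List Int × Int) aa =>
      if aa = '-' then (st.1 ++ [(-1 : Int)], st.2)
      else (st.1 ++ [st.2], st.2 + 1))
    (([] : List Int), (0 : Int))).1

-- ===== PORT B =====
-- first pass: gaps = [0]; for aa in seq: gaps.append(gaps[-1] + (aa == '-'))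
-- gaps[-1] ported as pyGetD g (-1) 0: exact, since g is never empty (it starts as [0] and only grows)
def pvGapsTable (cs : List Char) : List Int :=
  cs.foldl
    (fun (g : List Int) aa => g ++ [PySem.List.pyGetD g (-1) 0 + (if aa = '-' then (1 : Int) else 0)])
    [(0 : Int)]

-- second pass: [-1 if aa == '-' else p - gaps[p] for p, aa in enumerate(seq)]
-- gaps[p] ported as pyGetD gaps p 0: exact, since 0 ≤ p < len(seq) < len(gaps)
def pvIdxFromGaps (cs : List Char) (gaps : List Int) : List Int :=
  (PySem.List.enumerate cs).map (fun pa =>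
    if pa.2 = '-' then (-1 : Int) else pa.1 - PySem.List.pyGetD gaps pa.1 0)

def seq_with_gap_to_idx_alt (seq : String) : List Int :=
  pvIdxFromGaps seq.toList (pvGapsTable seq.toList)

-- ===== PRECONDITION & SPEC =====
def Spec_seq_with_gap_to_idx (seq : String) (out : List Int) : Prop := out = seq_with_gap_to_idx_alt seq
instance (seq : String) (out : List Int) : Decidable (Spec_seq_with_gap_to_idx seq out) := by unfold Spec_seq_with_gap_to_idx; infer_instance

-- ===== CLAIM (what is proved, stated in full; the proofs are below) =====
def Claim_equal_seq_with_gap_to_idx : Prop := ∀ (seq : String), Dom_seq_with_gap_to_idx seq → Spec_seq_with_gap_to_idx seq (seq_with_gap_to_idx seq)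

-- ===== LEMMAS AND PROOFS =====

-- common recursive reference: A's loop unrolled structurally
def gapGo : List Char → Int → List Int
  | [], _ => []
  | c :: cs, i => if c = '-' then (-1 : Int) :: gapGo cs i else i :: gapGo cs (i + 1)

-- the tail of the gap table built from running value v
def tblAux : List Char → Int → List Int
  | [], _ => []
  | c :: cs, v =>
    (v + (if c = '-' then (1 : Int) else 0)) :: tblAux cs (v + (if c = '-' then (1 : Int) else 0))

theorem foldA_eq_gapGo (cs : List Char) : ∀ (acc : List Int) (i : Int),
    (cs.foldl
      (fun (st : List Int × Int) aa =>
        if aa = '-' then (st.1 ++ [(-1 : Int)], st.2)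
        else (st.1 ++ [st.2], st.2 + 1))
      (acc, i)).1 = acc ++ gapGo cs i := by
  induction cs with
  | nil => intro acc i; simp [gapGo]
  | cons c cs ih =>
    intro acc i
    by_cases hc : c = '-'
    · simp [gapGo, hc, List.foldl_cons, ih]
    · simp [gapGo, hc, List.foldl_cons, ih]

theorem foldGaps (cs : List Char) : ∀ (g : List Int) (v : Int),
    cs.foldl
      (fun (g : List Int) aa => g ++ [PySem.List.pyGetD g (-1) 0 + (if aa = '-' then (1 : Int) else 0)])
      (g ++ [v])
    = (g ++ [v]) ++ tblAux cs v := by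
  induction cs with
  | nil => intro g v; simp [tblAux]
  | cons c cs ih =>
    intro g v
    rw [List.foldl_cons]
    have hlast : PySem.List.pyGetD (g ++ [v]) (-1) 0 = v := by simp [pysem]
    rw [hlast]
    rw [show (g ++ [v]) ++ [v + (if c = '-' then (1 : Int) else 0)]
        = (g ++ [v]) ++ [v + (if c = '-' then (1 : Int) else 0)] from rfl]
    rw [ih (g ++ [v]) (v + (if c = '-' then (1 : Int) else 0))]
    simp [tblAux, List.append_assoc]

theorem tbl_getD (cs : List Char) : ∀ (v : Int) (j : Nat), j < cs.length →
    (tblAux cs v).getD j 0 = v + (((cs.take (j + 1)).count '-' : Nat) : Int) := by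
  induction cs with
  | nil => intro v j h; simp at h
  | cons c cs ih =>
    intro v j h
    cases j with
    | zero =>
      by_cases hc : c = '-' <;> simp [tblAux, hc]
    | succ j =>
      have hj : j < cs.length := by simpa using Nat.lt_of_succ_lt_succ h
      simp only [tblAux, List.getD_cons_succ]
      rw [ih _ j hj]
      have htake : (c :: cs).take (j + 1 + 1) = c :: cs.take (j + 1) := by simp
      rw [htake]
      by_cases hc : c = '-'
      · simp [hc]
        ring
      · simp [hc]

theorem gaps_getD (cs : List Char) (j : Nat) (hj : j ≤ cs.length) :
    PySem.List.pyGetD (pvGapsTable cs) (j : Int) 0 = (((cs.take j).count '-' : Nat) : Int) := by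
  have hg : pvGapsTable cs = [(0 : Int)] ++ tblAux cs 0 := by
    unfold pvGapsTable
    simpa using foldGaps cs [] 0
  rw [hg, PySem.List.pyGetD_natCast]
  cases j with
  | zero => simp
  | succ j =>
    have hj' : j < cs.length := by omega
    simpa using tbl_getD cs 0 j hj'

theorem mapB_eq_gapGo (s : List Char) (G : List Int)
    (hG : ∀ (j : Nat), j ≤ s.length →
      PySem.List.pyGetD G (j : Int) 0 = (((s.take j).count '-' : Nat) : Int)) :
    ∀ (cs pre : List Char), s = pre ++ cs →
    (PySem.List.enumerate cs (pre.length : Int)).map (fun pa =>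
      if pa.2 = '-' then (-1 : Int) else pa.1 - PySem.List.pyGetD G pa.1 0)
    = gapGo cs ((pre.length : Int) - (pre.count '-' : Int)) := by
  intro cs
  induction cs with
  | nil => intro pre _; simp [PySem.List.enumerate_nil, gapGo]
  | cons c cs ih =>
    intro pre hs
    rw [PySem.List.enumerate_cons, List.map_cons]
    have hpre1 : ((pre.length : Int) + 1) = (((pre ++ [c]).length : Nat) : Int) := by
      simp
    have htail : (PySem.List.enumerate cs ((pre.length : Int) + 1)).map (fun pa =>
        if pa.2 = '-' then (-1 : Int) else pa.1 - PySem.List.pyGetD G pa.1 0)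
        = gapGo cs (((pre ++ [c]).length : Int) - ((pre ++ [c]).count '-' : Int)) := by
      rw [hpre1]
      exact ih (pre ++ [c]) (by simpa using hs)
    have hcnt : PySem.List.pyGetD G ((pre.length : Nat) : Int) 0 = ((pre.count '-' : Nat) : Int) := by
      rw [hG pre.length (by simp [hs])]
      rw [hs]
      simp
    rw [hcnt, htail]
    have h2 : ((pre ++ [c]).length : Int) = (pre.length : Int) + 1 := by simp
    by_cases hc : c = '-'
    · have h1 : ((pre ++ [c]).count '-' : Int) = (pre.count '-' : Int) + 1 := by
        push_cast [List.count_append]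
        simp [hc]
      rw [if_pos hc, h1, h2]
      simp only [gapGo, if_pos hc]
      congr 2
      ring
    · have h1 : ((pre ++ [c]).count '-' : Int) = (pre.count '-' : Int) := by
        push_cast [List.count_append]
        simp [hc]
      rw [if_neg hc, h1, h2]
      simp only [gapGo, if_neg hc]
      congr 2
      ring

-- ===== VERDICT (by name: the statement is the Claim_ definition above) =====
theorem seq_with_gap_to_idx_spec : Claim_equal_seq_with_gap_to_idx := by
  intro seq _
  unfold Spec_seq_with_gap_to_idx seq_with_gap_to_idx seq_with_gap_to_idx_alt pvIdxFromGaps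
  rw [foldA_eq_gapGo, List.nil_append]
  have h := mapB_eq_gapGo seq.toList (pvGapsTable seq.toList)
    (fun j hj => gaps_getD seq.toList j hj) seq.toList [] (by simp)
  simp only [List.length_nil, Nat.cast_zero, List.count_nil, sub_zero] at h
  exact h.symm
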